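-- pv_equiv track=rewrite | github.com/jadensimmons18/cs2-assignment6 | SkipListTester.py | bit_bunny_message
-- ===== SOURCE A (Python) =====
-- def bit_bunny_message(student_name: str, name_wrap_threshold: int = 22, wrap_width: int = 28) -> str:
--     quote = f'Hi there! I\'m Bit Bunny! You hopped through every bug, {student_name}!'
--     should_wrap = len(student_name) > name_wrap_threshold
--
--     lines = []
--
--     if should_wrap:
--         words = quote.split()
--         if not words:
--             wrapped_lines = [""]
--         else:
--             wrapped_lines = []
--             current = words[0]
--             for w in words[1:]:
--                 if len(current) + 1 + len(w) <= wrap_width: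
--                     current += " " + w
--                 else:
--                     wrapped_lines.append(current)
--                     current = w
--             wrapped_lines.append(current)
--
--         lines.append(f' (\\(\\        "{wrapped_lines[0]}"')
--
--         for mid in wrapped_lines[1:]:
--             lines.append(f' ( -.-)      "{mid}"')
--     else:
--         lines.append(f' (\\(\\        "{quote}"')
--
--     lines.append(' ( -.-)      All tests passed! Your skip list is in great shape!')
--     lines.append(' o_(")(")    Add more tests before grading burrows in!')
--
--     return "\n".join(lines)
-- ===== SOURCE B (Python) =====
-- def bit_bunny_message(student_name: str, name_wrap_threshold: int = 22, wrap_width: int = 28) -> str: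
--     quote = "Hi there! I'm Bit Bunny! You hopped through every bug, " + student_name + "!"
--
--     if len(student_name) > name_wrap_threshold:
--         # Greedy wrap by chunking: for each line find the end index j, then join the slice.
--         words = quote.split()
--         body = []
--         i, n = 0, len(words)
--         while i < n:
--             j, width = i + 1, len(words[i])
--             while j < n and width + 1 + len(words[j]) <= wrap_width:
--                 width += 1 + len(words[j])
--                 j += 1
--             body.append(" ".join(words[i:j]))
--             i = j
--         if not body:
--             body = [""]
--     else:
--         body = [quote]
--
--     art = [' (\\(\\        '] + [' ( -.-)      '] * (len(body) - 1)
--     out = [prefix + '"' + line + '"' for prefix, line in zip(art, body)]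
--     out.append(' ( -.-)      All tests passed! Your skip list is in great shape!')
--     out.append(' o_(")(")    Add more tests before grading burrows in!')
--     return "\n".join(out)
-- ===== Notes on version B (the rewrite author's own statement) =====
-- stated objective: alternative
-- what changed: Wrapping no longer accumulates a growing current-line string in a fold: B finds each line's end index with an inner fit scan and joins the word slice, and formats all lines uniformly by zipping a prefix list instead of special-casing the first line.
import Mathlib
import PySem

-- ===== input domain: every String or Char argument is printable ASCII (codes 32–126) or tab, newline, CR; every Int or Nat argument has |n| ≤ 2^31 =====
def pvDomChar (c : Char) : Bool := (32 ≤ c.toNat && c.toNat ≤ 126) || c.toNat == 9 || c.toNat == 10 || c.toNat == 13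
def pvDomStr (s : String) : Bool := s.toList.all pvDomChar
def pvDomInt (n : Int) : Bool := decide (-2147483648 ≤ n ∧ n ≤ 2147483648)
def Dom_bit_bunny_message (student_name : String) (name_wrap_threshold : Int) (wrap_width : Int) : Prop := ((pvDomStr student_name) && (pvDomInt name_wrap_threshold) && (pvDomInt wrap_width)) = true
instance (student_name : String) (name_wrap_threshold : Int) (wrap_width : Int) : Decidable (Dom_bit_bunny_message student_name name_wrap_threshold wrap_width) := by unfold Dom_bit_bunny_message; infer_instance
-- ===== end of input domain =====

-- B replaces A's fold that grows a current-line string with index-based chunking (fit scan + slice join)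
-- and formats all lines uniformly via a zipped prefix list; same output, no speed claim.

-- ===== PORT A =====
-- A's for-loop over words[1:] with state (wrapped_lines, current)
def pvLoopA (wrapW : Int) (st : List String × String) (w : String) : List String × String :=
  if PySem.Str.len st.2 + 1 + PySem.Str.len w ≤ wrapW then (st.1, st.2 ++ " " ++ w)
  else (st.1 ++ [st.2], w)

-- A's 'if not words: [""] else: greedy loop; wrapped_lines.append(current)'
def pvWrapA (wrapW : Int) : List String → List String
  | [] => [""]
  | w0 :: rest =>
    let st := rest.foldl (pvLoopA wrapW) ([], w0)
    st.1 ++ [st.2]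

def bit_bunny_message (student_name : String) (name_wrap_threshold : Int) (wrap_width : Int) : String :=
  let quote := "Hi there! I'm Bit Bunny! You hopped through every bug, " ++ student_name ++ "!"
  let should_wrap := PySem.Str.len student_name > name_wrap_threshold
  let lines : List String :=
    if should_wrap then
      let wrapped_lines := pvWrapA wrap_width (PySem.Str.split₀ quote)
      (" (\\(\\        \"" ++ PySem.List.pyGetD wrapped_lines 0 "" ++ "\"") ::
        (PySem.List.slice wrapped_lines (some 1) none).map
          (fun mid => " ( -.-)      \"" ++ mid ++ "\"")
    else
      [" (\\(\\        \"" ++ quote ++ "\""]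
  PySem.Str.join "\n"
    (lines ++ [" ( -.-)      All tests passed! Your skip list is in great shape!",
               " o_(\")(\")    Add more tests before grading burrows in!"])

-- ===== PORT B =====
-- Source B's inner while: how many further words fit on a line that currently has width `width`
def pvFitSpan (wrapW : Int) (width : Int) : List String → Nat
  | [] => 0
  | w :: ws =>
    if width + 1 + PySem.Str.len w ≤ wrapW then pvFitSpan wrapW (width + 1 + PySem.Str.len w) ws + 1
    else 0

-- Source B's outer while over indices i/j; the slice words[i:j] is `take` of the remaining words
def pvChunks (wrapW : Int) : List String → List String
  | [] => []
  | w :: ws =>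
    let k := pvFitSpan wrapW (PySem.Str.len w) ws
    PySem.Str.join " " (w :: ws.take k) :: pvChunks wrapW (ws.drop k)
termination_by l => l.length
decreasing_by simp

def bit_bunny_message_alt (student_name : String) (name_wrap_threshold : Int) (wrap_width : Int) : String :=
  let quote := "Hi there! I'm Bit Bunny! You hopped through every bug, " ++ student_name ++ "!"
  let body : List String :=
    if PySem.Str.len student_name > name_wrap_threshold then
      let b := pvChunks wrap_width (PySem.Str.split₀ quote)
      if b = [] then [""] else b
    else [quote]
  let art : List String := " (\\(\\        " :: List.replicate (body.length - 1) " ( -.-)      "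
  let out := (art.zip body).map (fun p => p.1 ++ "\"" ++ p.2 ++ "\"")
  PySem.Str.join "\n"
    (out ++ [" ( -.-)      All tests passed! Your skip list is in great shape!",
             " o_(\")(\")    Add more tests before grading burrows in!"])

-- ===== PRECONDITION & SPEC =====
def Spec_bit_bunny_message (student_name : String) (name_wrap_threshold : Int) (wrap_width : Int) (out : String) : Prop := out = bit_bunny_message_alt student_name name_wrap_threshold wrap_width
instance (student_name : String) (name_wrap_threshold : Int) (wrap_width : Int) (out : String) : Decidable (Spec_bit_bunny_message student_name name_wrap_threshold wrap_width out) := by unfold Spec_bit_bunny_message; infer_instance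

-- ===== CLAIM (what is proved, stated in full; the proofs are below) =====
def Claim_equal_bit_bunny_message : Prop := ∀ (student_name : String) (name_wrap_threshold : Int) (wrap_width : Int), Dom_bit_bunny_message student_name name_wrap_threshold wrap_width → Spec_bit_bunny_message student_name name_wrap_threshold wrap_width (bit_bunny_message student_name name_wrap_threshold wrap_width)

-- ===== LEMMAS AND PROOFS =====

theorem pvChunks_nil (W : Int) : pvChunks W [] = [] := by rw [pvChunks.eq_def]

theorem pvChunks_cons (W : Int) (w : String) (ws : List String) :
    pvChunks W (w :: ws) =
      PySem.Str.join " " (w :: ws.take (pvFitSpan W (PySem.Str.len w) ws)) ::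
        pvChunks W (ws.drop (pvFitSpan W (PySem.Str.len w) ws)) := by
  rw [pvChunks.eq_def]

-- gluing a word onto the head of a join: "cur" ++ " " ++ "w…".join = join of "cur"::"w"::…
theorem pv_join_glue (a b : String) (l : List String) :
    PySem.Str.join " " ((a ++ " " ++ b) :: l) = PySem.Str.join " " (a :: b :: l) := by
  apply String.toList_inj.mp
  simp [PySem.Str.toList_join]
  cases l with
  | nil => simp [PySem.Chars.join_singleton, PySem.Chars.join_cons_cons]
  | cons c cs => simp [PySem.Chars.join_cons_cons]

theorem pv_join_single (a : String) : PySem.Str.join " " [a] = a := by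
  apply String.toList_inj.mp
  simp [PySem.Str.toList_join, PySem.Chars.join_singleton]

-- A's fold produces exactly B's greedy chunks, started from an arbitrary current line
theorem pv_loop_eq_chunks (W : Int) (ws : List String) : ∀ (acc : List String) (cur : String),
    (ws.foldl (pvLoopA W) (acc, cur)).1 ++ [(ws.foldl (pvLoopA W) (acc, cur)).2] =
      acc ++ (PySem.Str.join " " (cur :: ws.take (pvFitSpan W (PySem.Str.len cur) ws)) ::
              pvChunks W (ws.drop (pvFitSpan W (PySem.Str.len cur) ws))) := by
  induction ws with
  | nil => intro acc cur; simp [pvFitSpan, pvChunks_nil, pv_join_single]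
  | cons w ws ih =>
    intro acc cur
    by_cases h : PySem.Str.len cur + 1 + PySem.Str.len w ≤ W
    · have hlen : PySem.Str.len (cur ++ " " ++ w) = PySem.Str.len cur + 1 + PySem.Str.len w := by
        simp [PySem.Str.len]; omega
      simp only [List.foldl_cons, pvLoopA, h, if_pos]
      rw [ih acc (cur ++ " " ++ w)]
      simp only [pvFitSpan, h, if_pos, hlen]
      rw [pv_join_glue]
      simp [List.take, List.drop]
    · simp only [List.foldl_cons, pvLoopA, h, if_neg, not_false_iff]
      rw [ih (acc ++ [cur]) w]
      simp only [pvFitSpan, h, if_neg, not_false_iff]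
      simp [pvChunks_cons, pv_join_single]

theorem pv_lit1 (x : String) :
    " (\\(\\        " ++ "\"" ++ x ++ "\"" = " (\\(\\        \"" ++ x ++ "\"" := by
  have h : (" (\\(\\        " ++ "\"" : String) = " (\\(\\        \"" := rfl
  rw [h]

theorem pv_lit2 (x : String) :
    " ( -.-)      " ++ "\"" ++ x ++ "\"" = " ( -.-)      \"" ++ x ++ "\"" := by
  have h : (" ( -.-)      " ++ "\"" : String) = " ( -.-)      \"" := rfl
  rw [h]

-- zipping a constant prefix list is mapping the prefix on
theorem pv_zip_replicate_map (p : String) (f : String × String → String) :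
    ∀ (bs : List String), ((List.replicate bs.length p).zip bs).map f = bs.map (fun b => f (p, b)) := by
  intro bs
  induction bs with
  | nil => simp
  | cons b bs ih => simp [List.replicate, ih]

-- ===== VERDICT (by name: the statement is the Claim_ definition above) =====
set_option maxRecDepth 4096 in
theorem bit_bunny_message_spec : Claim_equal_bit_bunny_message := by
  intro name th W _
  unfold Spec_bit_bunny_message bit_bunny_message bit_bunny_message_alt
  by_cases hw : PySem.Str.len name > th
  · simp only [hw, if_pos]
    cases hws : PySem.Str.split₀ ("Hi there! I'm Bit Bunny! You hopped through every bug, " ++ name ++ "!") with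
    | nil => simp [pvWrapA, pvChunks_nil]; decide
    | cons w0 rest =>
      simp only [pvWrapA]
      rw [pv_loop_eq_chunks W rest [] w0]
      rw [pvChunks_cons]
      simp only [List.nil_append, List.cons_ne_nil, if_neg, not_false_iff]
      apply congrArg
      simp only [List.length_cons, Nat.add_sub_cancel, List.zip_cons_cons, List.map_cons,
        pv_zip_replicate_map, pv_lit1, pv_lit2, pysem, List.getD_cons_zero, List.tail_cons]
  · simp only [hw, if_false]
    apply String.toList_inj.mp
    simp [PySem.Str.toList_join, PySem.Chars.join_cons_cons]
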